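-- pv_equiv track=rewrite | github.com/JHUAPL/squec | squec/pmss.py | _edges_span_required
-- ===== SOURCE A (Python) =====
-- from typing import Hashable
--
-- VertexID = Hashable
--
-- def _edges_span_required(
--     combo: list[tuple[VertexID, VertexID]], vbunch: list[VertexID]
-- ) -> bool:
--     """Return true if all vertices are included in the set."""
--     for v in vbunch:
--         found = False
--         for edge in combo:
--             if v in edge:
--                 found = True
--                 break
--         if not found:
--             return False
--     return True
-- ===== SOURCE B (Python) =====
-- def _edges_span_required(combo, vbunch):
--     """Return true if all vertices are included in the set."""
--     needed = set(vbunch)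
--     for edge in combo:
--         for x in edge:
--             needed.discard(x)
--         if not needed:
--             return True
--     return not needed
-- ===== Notes on version B (the rewrite author's own statement) =====
-- stated objective: alternative
-- what changed: Inverts the loop nesting: instead of scanning all edges for each vertex, B builds a set of still-uncovered required vertices once and makes a single pass over the edges, discarding endpoints and returning True as soon as the set is empty.
import Mathlib
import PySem

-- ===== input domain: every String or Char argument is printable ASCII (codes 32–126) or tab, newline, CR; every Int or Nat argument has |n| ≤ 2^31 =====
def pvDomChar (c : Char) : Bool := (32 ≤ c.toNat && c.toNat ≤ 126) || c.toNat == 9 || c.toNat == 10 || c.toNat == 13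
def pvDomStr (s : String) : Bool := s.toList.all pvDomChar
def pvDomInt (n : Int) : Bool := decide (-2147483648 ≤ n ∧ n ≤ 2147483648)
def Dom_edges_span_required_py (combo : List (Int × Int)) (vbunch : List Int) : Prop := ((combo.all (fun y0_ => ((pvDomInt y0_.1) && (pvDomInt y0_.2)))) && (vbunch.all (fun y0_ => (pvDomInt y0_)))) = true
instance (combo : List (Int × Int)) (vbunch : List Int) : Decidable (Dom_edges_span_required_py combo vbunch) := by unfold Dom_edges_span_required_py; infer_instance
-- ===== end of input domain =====

-- B inverts the loop nesting: one pass over the edges maintaining the set of still-uncovered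
-- required vertices, instead of a scan over all edges for each vertex (objective: alternative).

-- ===== PORT A =====
-- inner 'for edge in combo: if v in edge: found = True; break' — the loop with break,
-- returning the final value of 'found'
def pvFoundA (v : Int) : List (Int × Int) → Bool
  | [] => false
  | e :: rest => if v == e.1 || v == e.2 then true else pvFoundA v rest

-- outer 'for v in vbunch: … if not found: return False' / 'return True'
def pvOuterA (combo : List (Int × Int)) : List Int → Bool
  | [] => true
  | v :: rest => if !(pvFoundA v combo) then false else pvOuterA combo rest

def edges_span_required_py (combo : List (Int × Int)) (vbunch : List Int) : Bool :=
  pvOuterA combo vbunch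

-- ===== PORT B =====
-- 'for edge in combo: for x in edge: needed.discard(x); if not needed: return True' / 'return not needed'
def pvLoopB : List (Int × Int) → PySem.Set Int → Bool
  | [], needed => needed.isEmpty
  | e :: rest, needed =>
      let needed1 := PySem.Set.discard (PySem.Set.discard needed e.1) e.2
      if needed1.isEmpty then true else pvLoopB rest needed1

def edges_span_required_py_alt (combo : List (Int × Int)) (vbunch : List Int) : Bool :=
  pvLoopB combo (PySem.Set.ofList vbunch)

-- ===== PRECONDITION & SPEC =====
def Spec_edges_span_required_py (combo : List (Int × Int)) (vbunch : List Int) (out : Bool) : Prop := out = edges_span_required_py_alt combo vbunch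
instance (combo : List (Int × Int)) (vbunch : List Int) (out : Bool) : Decidable (Spec_edges_span_required_py combo vbunch out) := by unfold Spec_edges_span_required_py; infer_instance

-- ===== CLAIM (what is proved, stated in full; the proofs are below) =====
def Claim_equal_edges_span_required_py : Prop := ∀ (combo : List (Int × Int)) (vbunch : List Int), Dom_edges_span_required_py combo vbunch → Spec_edges_span_required_py combo vbunch (edges_span_required_py combo vbunch)

-- ===== LEMMAS AND PROOFS =====

-- A's inner loop is 'some edge contains v'
theorem pvFoundA_eq_any (v : Int) (combo : List (Int × Int)) :
    pvFoundA v combo = combo.any (fun e => v == e.1 || v == e.2) := by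
  induction combo with
  | nil => rfl
  | cons e rest ih =>
      simp only [pvFoundA, List.any_cons]
      split_ifs with h
      · simp [h]
      · simp [h, ih]

-- A's outer loop is 'every v is covered'
theorem pvOuterA_eq_all (combo : List (Int × Int)) (vbunch : List Int) :
    pvOuterA combo vbunch = vbunch.all (fun v => combo.any (fun e => v == e.1 || v == e.2)) := by
  induction vbunch with
  | nil => rfl
  | cons v rest ih =>
      simp only [pvOuterA, List.all_cons, pvFoundA_eq_any]
      cases h : combo.any (fun e => v == e.1 || v == e.2) <;> simp [h, ih]

-- B's loop, on a duplicate-free 'needed', decides 'every needed vertex is covered by some edge'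
theorem pvLoopB_eq_all (combo : List (Int × Int)) (needed : PySem.Set Int) :
    pvLoopB combo needed = needed.all (fun v => combo.any (fun e => v == e.1 || v == e.2)) := by
  induction combo generalizing needed with
  | nil =>
      simp only [pvLoopB, List.any_nil]
      cases needed <;> simp
  | cons e rest ih =>
      simp only [pvLoopB]
      have hmem : ∀ x : Int, x ∈ PySem.Set.discard (PySem.Set.discard needed e.1) e.2 ↔
          x ∈ needed ∧ x ≠ e.1 ∧ x ≠ e.2 := by
        intro x
        rw [PySem.Set.mem_discard, PySem.Set.mem_discard]
        tauto
      split_ifs with hemp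
      · -- the remaining set is empty: every needed vertex is an endpoint of e
        symm
        simp only [List.all_eq_true, List.any_cons]
        intro v hv
        by_cases h1 : v = e.1
        · simp [h1]
        by_cases h2 : v = e.2
        · simp [h2]
        · exfalso
          have : v ∈ PySem.Set.discard (PySem.Set.discard needed e.1) e.2 :=
            (hmem v).mpr ⟨hv, h1, h2⟩
          simp [List.isEmpty_iff.mp hemp] at this
      · rw [ih _]
        rw [Bool.eq_iff_iff]
        simp only [List.all_eq_true, List.any_cons]
        constructor
        · intro h v hv
          by_cases h1 : v = e.1
          · simp [h1]
          by_cases h2 : v = e.2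
          · simp [h2]
          · have := h v ((hmem v).mpr ⟨hv, h1, h2⟩)
            simp only [Bool.or_eq_true] at this ⊢
            tauto
        · intro h v hv
          obtain ⟨hv', h1, h2⟩ := (hmem v).mp hv
          have := h v hv'
          simp only [Bool.or_eq_true, beq_iff_eq] at this ⊢
          rcases this with (h' | h') | h'
          · exact absurd h' h1
          · exact absurd h' h2
          · exact h'

-- ===== VERDICT (by name: the statement is the Claim_ definition above) =====
theorem edges_span_required_py_spec : Claim_equal_edges_span_required_py := by
  intro combo vbunch _
  unfold Spec_edges_span_required_py edges_span_required_py edges_span_required_py_alt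
  rw [pvOuterA_eq_all, pvLoopB_eq_all combo _]
  rw [Bool.eq_iff_iff]
  simp only [List.all_eq_true]
  constructor
  · intro h v hv
    exact h v (by simpa using (PySem.Set.mem_ofList (y := v) (xs := vbunch)).mp hv)
  · intro h v hv
    exact h v ((PySem.Set.mem_ofList (y := v) (xs := vbunch)).mpr (by simpa using hv))
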